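-- pv_equiv track=rewrite | github.com/appley/advent2023 | 1201ii.py | check_line_for_word
-- ===== SOURCE A (Python) =====
-- def check_line_for_word(line, word):
--
--     new_word = ""
--
--     for i in line:
--         new_word = new_word + i
--         if new_word != word:
--             continue
--         else:
--             return new_word
-- ===== SOURCE B (Python) =====
-- def check_line_for_word(line, word):
--     if word and line.startswith(word):
--         return word
--     return None
-- ===== Notes on version B (the rewrite author's own statement) =====
-- stated objective: faster
-- what changed: Replaced the incremental character-accumulation loop (rebuilding a growing prefix string and comparing it to word each step) with a single library prefix test line.startswith(word) guarded by word being non-empty (A never matches the empty word).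
import Mathlib
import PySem

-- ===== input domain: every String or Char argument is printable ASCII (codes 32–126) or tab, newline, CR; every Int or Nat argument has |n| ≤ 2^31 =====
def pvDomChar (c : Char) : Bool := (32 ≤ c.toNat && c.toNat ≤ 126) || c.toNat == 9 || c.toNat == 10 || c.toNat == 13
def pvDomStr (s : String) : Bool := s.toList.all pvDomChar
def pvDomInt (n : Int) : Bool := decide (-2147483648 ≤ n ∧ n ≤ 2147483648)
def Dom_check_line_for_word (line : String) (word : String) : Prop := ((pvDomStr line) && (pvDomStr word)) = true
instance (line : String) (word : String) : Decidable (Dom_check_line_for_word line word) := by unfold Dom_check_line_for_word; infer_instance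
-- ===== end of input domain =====

-- B replaces A's character-accumulation loop with a guarded startswith prefix test (idiomatic; same results).


-- ===== PORT A =====
-- the 'for i in line' loop with accumulator new_word and early return
def check_line_for_word_go (word : String) : List Char → String → Option String
  | [], _ => none
  | c :: rest, new_word =>
      let new_word' := new_word.push c
      if new_word' ≠ word then check_line_for_word_go word rest new_word'
      else some new_word'

def check_line_for_word (line : String) (word : String) : Option String :=
  check_line_for_word_go word line.toList ""

-- ===== PORT B =====
def check_line_for_word_alt (line : String) (word : String) : Option String :=
  if word ≠ "" && PySem.Str.startswith line word then some word else none

-- ===== PRECONDITION & SPEC =====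
def Spec_check_line_for_word (line : String) (word : String) (out : Option String) : Prop := out = check_line_for_word_alt line word
instance (line : String) (word : String) (out : Option String) : Decidable (Spec_check_line_for_word line word out) := by unfold Spec_check_line_for_word; infer_instance

-- ===== CLAIM (what is proved, stated in full; the proofs are below) =====
def Claim_equal_check_line_for_word : Prop := ∀ (line : String) (word : String), Dom_check_line_for_word line word → Spec_check_line_for_word line word (check_line_for_word line word)

-- ===== LEMMAS AND PROOFS =====

-- A's loop returns some word exactly when the accumulator is a strict partial prefix that
-- word extends and word is a prefix of accumulator ++ remaining characters.
theorem check_line_for_word_go_eq (word : String) (cs : List Char) (acc : String) :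
    check_line_for_word_go word cs acc =
      (if acc.toList.length < word.toList.length ∧ word.toList <+: acc.toList ++ cs
       then some word else none) := by
  induction cs generalizing acc with
  | nil =>
      simp only [check_line_for_word_go, List.append_nil]
      rw [if_neg]
      rintro ⟨hlt, hpre⟩
      exact absurd (List.IsPrefix.length_le hpre) (by omega)
  | cons c rest ih =>
      simp only [check_line_for_word_go]
      by_cases h : acc.push c = word
      · rw [if_neg (by simp [h])]
        have hl : word.toList = acc.toList ++ [c] := by
          rw [← h]; simp [String.toList_push]
        rw [if_pos ⟨by simp [hl], ⟨rest, by simp [hl]⟩⟩, h]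
      · rw [if_pos (by simp [h]), ih]
        have hlist : (acc.push c).toList = acc.toList ++ [c] := by simp [String.toList_push]
        congr 1
        rw [hlist]
        simp only [List.append_assoc, List.cons_append, List.nil_append, List.length_append,
          List.length_cons, List.length_nil, eq_iff_iff]
        constructor
        · rintro ⟨hlt, hpre⟩; exact ⟨by omega, hpre⟩
        · rintro ⟨hlt, hpre⟩
          refine ⟨?_, hpre⟩
          rcases Nat.lt_or_ge (acc.toList.length + 1) word.toList.length with h1 | h1
          · exact h1
          · exfalso
            -- word.toList has length ≤ acc.length + 1 and ≥ acc.length + 1, so = acc ++ [c]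
            have hlen : word.toList.length = acc.toList.length + 1 := by omega
            have hpre2 : acc.toList ++ [c] <+: acc.toList ++ c :: rest := ⟨rest, by simp⟩
            have : word.toList = acc.toList ++ [c] := by
              have h1 : word.toList <+: acc.toList ++ [c] :=
                List.prefix_of_prefix_length_le hpre hpre2 (by simp only [List.length_append, List.length_cons, List.length_nil]; omega)
              exact h1.eq_of_length (by simp [hlen])
            apply h
            apply String.toList_injective
            rw [hlist, this]

theorem check_line_for_word_eq (line word : String) :
    check_line_for_word line word =
      (if 0 < word.toList.length ∧ word.toList <+: line.toList then some word else none) := by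
  rw [check_line_for_word, check_line_for_word_go_eq]
  simp

-- ===== VERDICT (by name: the statement is the Claim_ definition above) =====
theorem check_line_for_word_spec : Claim_equal_check_line_for_word := by
  intro line word _
  unfold Spec_check_line_for_word check_line_for_word_alt
  rw [check_line_for_word_eq]
  rw [PySem.Str.startswith_eq]
  by_cases hw : word = ""
  · subst hw; simp
  · have hw' : word.toList ≠ [] := fun h => hw (String.toList_injective (by simp [h]))
    by_cases hp : word.toList <+: line.toList
    · rw [if_pos ⟨List.length_pos_of_ne_nil hw', hp⟩]
      simp [hw, PySem.Chars.startswith, hp]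
    · rw [if_neg (by rintro ⟨_, h⟩; exact hp h)]
      have : PySem.Chars.startswith line.toList word.toList = false := by
        by_contra h
        exact hp ((PySem.Chars.startswith_iff _ _).1 (by revert h; cases PySem.Chars.startswith line.toList word.toList <;> simp))
      simp [this]
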